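-- pv_equiv track=rewrite | github.com/MaxTop60/TorubarovME | lab 9/src/modules/tasks.py | longest_non_decreasing_subsequence
-- ===== SOURCE A (Python) =====
-- def longest_non_decreasing_subsequence(nums):
--     """
--     Находит длину наибольшей неубывающей подпоследовательности.
--     Отличие от LIS: допускаются равные элементы.
--
--     Args:
--         nums: список чисел
--
--     Returns:
--         кортеж (длина LNIS, сама подпоследовательность)
--     """
--     if not nums:
--         return 0, []
--
--     n = len(nums)
--     dp = [1] * n
--     prev = [-1] * n
--
--     for i in range(n):
--         for j in range(i):
--             if nums[j] <= nums[i] and dp[j] + 1 > dp[i]: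
--                 dp[i] = dp[j] + 1
--                 prev[i] = j
--
--     max_length = max(dp)
--     max_index = dp.index(max_length)
--
--     lnis = []
--     idx = max_index
--
--     while idx != -1:
--         lnis.append(nums[idx])
--         idx = prev[idx]
--
--     lnis.reverse()
--
--     return max_length, lnis
-- ===== SOURCE B (Python) =====
-- def longest_non_decreasing_subsequence(nums):
--     """Same result as the original, without a predecessor array: dp is computed
--     as a closed max per element, and the subsequence is reconstructed by
--     searching dp for the first index carrying each required length."""
--     if not nums:
--         return 0, []
--
--     dp = []
--     for x in nums:
--         dp.append(1 + max((dp[j] for j in range(len(dp)) if nums[j] <= x), default=0))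
--
--     best = max(dp)
--     cur = dp.index(best)
--
--     chain = [nums[cur]]
--     for target in range(best - 1, 0, -1):
--         for j in range(cur):
--             if dp[j] == target and nums[j] <= nums[cur]:
--                 cur = j
--                 break
--         chain.append(nums[cur])
--
--     chain.reverse()
--     return best, chain
-- ===== Notes on version B (the rewrite author's own statement) =====
-- stated objective: alternative
-- what changed: B drops A's prev array and first-improvement update loop: each dp entry is computed directly as 1 + max over eligible earlier entries, and the subsequence is reconstructed without predecessor links by searching, for each required length, the first earlier index with that dp value and a compatible element.
import Mathlib
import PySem

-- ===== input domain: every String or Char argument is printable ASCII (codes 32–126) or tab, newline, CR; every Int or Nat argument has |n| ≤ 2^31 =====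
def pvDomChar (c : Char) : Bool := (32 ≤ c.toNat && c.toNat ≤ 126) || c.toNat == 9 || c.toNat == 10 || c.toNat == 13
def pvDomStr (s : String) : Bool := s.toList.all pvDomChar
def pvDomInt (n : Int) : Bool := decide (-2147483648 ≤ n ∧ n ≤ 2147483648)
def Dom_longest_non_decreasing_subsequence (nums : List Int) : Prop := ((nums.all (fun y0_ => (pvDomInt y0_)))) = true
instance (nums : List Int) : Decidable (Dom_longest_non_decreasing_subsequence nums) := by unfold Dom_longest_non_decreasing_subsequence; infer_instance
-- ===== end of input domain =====

-- B recomputes each dp entry as a closed max over the processed prefix and reconstructs the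
-- subsequence by searching dp directly, eliminating A's predecessor array; alternative
-- decomposition, same O(n^2) cost.

-- ===== PORT A =====
-- fuel-guarded transliteration of A's 'while idx != -1' reconstruction loop
-- (fuel n+1 always suffices: the prev-chain is strictly decreasing)
def whileA (nums prev : List Int) : Nat → Int → List Int → List Int
  | 0, _, acc => acc
  | fuel+1, idx, acc =>
    if idx ≠ -1 then
      whileA nums prev fuel (PySem.List.pyGetD prev idx 0) (acc ++ [PySem.List.pyGetD nums idx 0])
    else acc

def longest_non_decreasing_subsequence (nums : List Int) : Int × List Int :=
  if nums = [] then (0, [])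
  else
    let n : Int := (nums.length : Int)
    let st :=
      (PySem.List.pyRange 0 n 1).foldl (fun st i =>
        (PySem.List.pyRange 0 i 1).foldl (fun st j =>
          let dp := st.1
          let prev := st.2
          if PySem.List.pyGetD nums j 0 ≤ PySem.List.pyGetD nums i 0 ∧
             PySem.List.pyGetD dp j 0 + 1 > PySem.List.pyGetD dp i 0 then
            (PySem.List.pySetD dp i (PySem.List.pyGetD dp j 0 + 1),
             PySem.List.pySetD prev i j)
          else st) st)
        (List.replicate nums.length (1 : Int), List.replicate nums.length (-1 : Int))
    let dp := st.1
    let prev := st.2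
    let maxLength := (PySem.List.max? dp (fun y => y)).getD 0
    let maxIndex : Int := (((PySem.List.index? dp maxLength).getD 0 : Nat) : Int)
    let lnis := whileA nums prev (nums.length + 1) maxIndex []
    (maxLength, lnis.reverse)

-- ===== PORT B =====
-- dp entry for the next element x: 1 + max(dp[j] for j in range(len(dp)) if nums[j] <= x), default 0
def altEntry (nums dp : List Int) (x : Int) : Int :=
  1 + PySem.List.maxD
        (((PySem.List.pyRange 0 (dp.length : Int) 1).filter
            (fun j => decide (PySem.List.pyGetD nums j 0 ≤ x))).map
          (fun j => PySem.List.pyGetD dp j 0))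
        (fun y => y) 0

def altDp (nums : List Int) : List Int :=
  nums.foldl (fun dp x => dp ++ [altEntry nums dp x]) []

-- one reconstruction step: first j < cur with dp[j] == target and nums[j] <= nums[cur] (cur if none)
def altStep (nums dp : List Int) (st : Int × List Int) (target : Int) : Int × List Int :=
  let cur := st.1
  let cur' := ((PySem.List.pyRange 0 cur 1).find?
      (fun j => decide (PySem.List.pyGetD dp j 0 = target ∧
                        PySem.List.pyGetD nums j 0 ≤ PySem.List.pyGetD nums cur 0))).getD cur
  (cur', st.2 ++ [PySem.List.pyGetD nums cur' 0])

def longest_non_decreasing_subsequence_alt (nums : List Int) : Int × List Int :=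
  if nums = [] then (0, [])
  else
    let dp := altDp nums
    let best := (PySem.List.max? dp (fun y => y)).getD 0
    let cur : Int := (((PySem.List.index? dp best).getD 0 : Nat) : Int)
    let st := (PySem.List.pyRange (best - 1) 0 (-1)).foldl (altStep nums dp)
                (cur, [PySem.List.pyGetD nums cur 0])
    (best, st.2.reverse)

-- ===== PRECONDITION & SPEC =====
def Spec_longest_non_decreasing_subsequence (nums : List Int) (out : Int × List Int) : Prop := out = longest_non_decreasing_subsequence_alt nums
instance (nums : List Int) (out : Int × List Int) : Decidable (Spec_longest_non_decreasing_subsequence nums out) := by unfold Spec_longest_non_decreasing_subsequence; infer_instance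

-- ===== CLAIM (what is proved, stated in full; the proofs are below) =====
def Claim_equal_longest_non_decreasing_subsequence : Prop := ∀ (nums : List Int), Dom_longest_non_decreasing_subsequence nums → Spec_longest_non_decreasing_subsequence nums (longest_non_decreasing_subsequence nums)


-- ===== LEMMAS AND PROOFS =====

-- running max of dp[j] over j < m with nums[j] ≤ x (A's inner-loop value)
def MxF (nums dp : List Int) (x : Int) (m : Nat) : Int :=
  (List.range m).foldl (fun a j => if nums.getD j 0 ≤ x then max a (dp.getD j 0) else a) 0

-- first j < m with dp[j] = t and nums[j] ≤ x
def PfindF (nums dp : List Int) (x t : Int) (m : Nat) : Option Nat :=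
  (List.range m).find? (fun j => decide (dp.getD j 0 = t ∧ nums.getD j 0 ≤ x))

def PfD : Option Nat → Int := fun o => o.elim (-1) (fun j => (j : Int))

-- B's dp restricted to the first m elements
def dpF (nums : List Int) : Nat → List Int
  | 0 => []
  | m+1 => dpF nums m ++ [altEntry nums (dpF nums m) (nums.getD m 0)]

-- the value A's prev array holds at i
def pfv (nums dp : List Int) (i : Nat) : Int :=
  PfD (PfindF nums dp (nums.getD i 0) (dp.getD i 0 - 1) i)

def prevL (nums dp : List Int) (m : Nat) : List Int := (List.range m).map (pfv nums dp)

def nextF (nums dp : List Int) (i : Nat) : Nat :=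
  (PfindF nums dp (nums.getD i 0) (dp.getD i 0 - 1) i).getD i

-- the reconstructed chain, k elements starting at index i
def pathF (nums dp : List Int) : Nat → Nat → List Int
  | 0, _ => []
  | k+1, i => nums.getD i 0 :: pathF nums dp k (nextF nums dp i)

-- Nat-index normal form of A's inner-loop body
def innerStepN (nums : List Int) (i : Nat) (st : List Int × List Int) (j : Nat) :
    List Int × List Int :=
  if nums.getD j 0 ≤ nums.getD i 0 ∧ st.1.getD i 0 < st.1.getD j 0 + 1 then
    (st.1.set i (st.1.getD j 0 + 1), st.2.set i (j : Int))
  else st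

lemma mx_succ (nums dp : List Int) (x : Int) (m : Nat) :
    MxF nums dp x (m+1) =
      if nums.getD m 0 ≤ x then max (MxF nums dp x m) (dp.getD m 0) else MxF nums dp x m := by
  simp [MxF, List.range_succ]

lemma mx_nonneg (nums dp : List Int) (x : Int) (m : Nat) : 0 ≤ MxF nums dp x m := by
  induction m with
  | zero => simp [MxF]
  | succ m ih =>
    rw [mx_succ]; split_ifs with h
    · exact le_trans ih (le_max_left _ _)
    · exact ih

lemma mx_ub (nums dp : List Int) (x : Int) (m : Nat) :
    ∀ j, j < m → nums.getD j 0 ≤ x → dp.getD j 0 ≤ MxF nums dp x m := by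
  induction m with
  | zero => omega
  | succ m ih =>
    intro j hj he
    rw [mx_succ]
    rcases Nat.lt_succ_iff_lt_or_eq.mp hj with h | rfl
    · split_ifs with h2
      · exact le_trans (ih j h he) (le_max_left _ _)
      · exact ih j h he
    · rw [if_pos he]; exact le_max_right _ _

lemma mx_att (nums dp : List Int) (x : Int) (m : Nat) :
    MxF nums dp x m = 0 ∨ ∃ j, j < m ∧ nums.getD j 0 ≤ x ∧ dp.getD j 0 = MxF nums dp x m := by
  induction m with
  | zero => left; simp [MxF]
  | succ m ih =>
    rw [mx_succ]
    split_ifs with he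
    · rcases max_choice (MxF nums dp x m) (dp.getD m 0) with h | h
      · rw [h]
        rcases ih with h0 | ⟨j, hj, hje, hjv⟩
        · exact Or.inl h0
        · exact Or.inr ⟨j, Nat.lt_succ_of_lt hj, hje, hjv⟩
      · rw [h]; exact Or.inr ⟨m, Nat.lt_succ_self m, he, rfl⟩
    · rcases ih with h0 | ⟨j, hj, hje, hjv⟩
      · exact Or.inl h0
      · exact Or.inr ⟨j, Nat.lt_succ_of_lt hj, hje, hjv⟩

lemma mx_le (nums dp : List Int) (x : Int) (m : Nat) (h : ∀ j, j < m → dp.getD j 0 ≤ (m : Int)) :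
    MxF nums dp x m ≤ (m : Int) := by
  rcases mx_att nums dp x m with h0 | ⟨j, hj, _, hjv⟩
  · rw [h0]; positivity
  · rw [← hjv]; exact h j hj

lemma mx_congr (nums dp dp' : List Int) (x : Int) (m : Nat)
    (h : ∀ j, j < m → dp.getD j 0 = dp'.getD j 0) :
    MxF nums dp x m = MxF nums dp' x m := by
  unfold MxF
  apply PySem.List.foldl_congr_mem
  intro acc j hj
  rw [h j (List.mem_range.mp hj)]

lemma find?_congr' {α : Type} (l : List α) (p q : α → Bool) (h : ∀ a ∈ l, p a = q a) :
    l.find? p = l.find? q := by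
  induction l with
  | nil => rfl
  | cons a t ih =>
    simp only [List.find?_cons]
    rw [h a (List.mem_cons_self)]
    cases q a
    · exact ih fun b hb => h b (List.mem_cons_of_mem a hb)
    · rfl

lemma maxD_append (L : List Int) (a : Int) (ha : 0 ≤ a) :
    PySem.List.maxD (L ++ [a]) (fun y => y) 0 = max (PySem.List.maxD L (fun y => y) 0) a := by
  cases L with
  | nil => simp [PySem.List.maxD, PySem.List.max?, max_eq_right ha]
  | cons hd t =>
    unfold PySem.List.maxD
    rw [List.cons_append, PySem.List.max?_id_cons, PySem.List.max?_id_cons, List.foldl_append]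
    simp

lemma pfind_congr (nums dp dp' : List Int) (x t : Int) (m : Nat)
    (h : ∀ j, j < m → dp.getD j 0 = dp'.getD j 0) :
    PfindF nums dp x t m = PfindF nums dp' x t m := by
  unfold PfindF
  apply find?_congr'
  intro j hj
  rw [h j (List.mem_range.mp hj)]

-- bridge: B's altEntry is 1 + running max, when all dp entries are ≥ 1
lemma altEntry_eq_mx (nums dp : List Int) (x : Int)
    (hpos : ∀ j, j < dp.length → 1 ≤ dp.getD j 0) :
    altEntry nums dp x = 1 + MxF nums dp x dp.length := by
  unfold altEntry
  congr 1
  rw [PySem.List.pyRange_zero_nat]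
  rw [List.filter_map, List.map_map]
  simp only [Function.comp_def, PySem.List.pyGetD_natCast]
  suffices h : ∀ m, m ≤ dp.length →
      PySem.List.maxD (((List.range m).filter (fun j => decide (nums.getD j 0 ≤ x))).map
        (fun j => dp.getD j 0)) (fun y => y) 0 = MxF nums dp x m by
    exact h dp.length le_rfl
  intro m hm
  induction m with
  | zero => simp [MxF, PySem.List.maxD, PySem.List.max?]
  | succ m ih =>
    rw [List.range_succ, List.filter_append, List.map_append, mx_succ,
        ← ih (Nat.le_of_succ_le hm)]
    by_cases he : nums.getD m 0 ≤ x
    · simp only [List.filter_cons, List.filter_nil, he, decide_true, if_pos, List.map_cons,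
        List.map_nil]
      exact maxD_append _ _ (le_trans zero_le_one (hpos m (Nat.lt_of_succ_le hm)))
    · simp only [List.getD_eq_getElem?_getD] at he
      simp [he]

lemma dpF_length (nums : List Int) (m : Nat) : (dpF nums m).length = m := by
  induction m with
  | zero => rfl
  | succ m ih => simp [dpF, ih]

lemma dpF_getD_lt (nums : List Int) (m m' : Nat) (j : Nat) (hj : j < m) (hm : m ≤ m') :
    (dpF nums m').getD j 0 = (dpF nums m).getD j 0 := by
  induction m', hm using Nat.le_induction with
  | base => rfl
  | succ m' hm ih =>
    rw [show dpF nums (m'+1) = dpF nums m' ++ [altEntry nums (dpF nums m') (nums.getD m' 0)] from rfl]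
    rw [List.getD_append _ _ _ _ (by rw [dpF_length]; omega), ih]

lemma dpF_pos_le (nums : List Int) (m : Nat) :
    ∀ j, j < m → 1 ≤ (dpF nums m).getD j 0 ∧ (dpF nums m).getD j 0 ≤ (j : Int) + 1 := by
  induction m with
  | zero => omega
  | succ m ih =>
    intro j hj
    rw [show dpF nums (m+1) = dpF nums m ++ [altEntry nums (dpF nums m) (nums.getD m 0)] from rfl]
    rcases Nat.lt_succ_iff_lt_or_eq.mp hj with h | rfl
    · rw [List.getD_append _ _ _ _ (by rw [dpF_length]; omega)]
      exact ih j h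
    · rw [List.getD_append_right _ _ _ _ (by rw [dpF_length])]
      rw [dpF_length, Nat.sub_self]
      have hpos : ∀ k, k < (dpF nums j).length → 1 ≤ (dpF nums j).getD k 0 := by
        intro k hk
        rw [dpF_length] at hk
        exact (ih k hk).1
      rw [show ([altEntry nums (dpF nums j) (nums.getD j 0)].getD 0 0) =
            altEntry nums (dpF nums j) (nums.getD j 0) from rfl]
      rw [altEntry_eq_mx nums _ _ hpos, dpF_length]
      constructor
      · have := mx_nonneg nums (dpF nums j) (nums.getD j 0) j
        omega
      · have := mx_le nums (dpF nums j) (nums.getD j 0) j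
          (fun k hk => le_trans ((ih k hk).2) (by omega))
        omega

lemma altDp_eq_dpF (nums : List Int) : altDp nums = dpF nums nums.length := by
  have h : ∀ m, m ≤ nums.length →
      (nums.take m).foldl (fun dp x => dp ++ [altEntry nums dp x]) [] = dpF nums m := by
    intro m hm
    induction m with
    | zero => rfl
    | succ m ih =>
      have hmn : m < nums.length := Nat.lt_of_succ_le hm
      rw [List.take_add_one, List.getElem?_eq_getElem hmn]
      rw [Option.toList_some, List.foldl_append, ih (Nat.le_of_succ_le hm)]
      show dpF nums m ++ [altEntry nums (dpF nums m) nums[m]] = _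
      rw [show nums[m] = nums.getD m 0 from (List.getD_eq_getElem nums 0 hmn).symm]
      rfl
  have := h nums.length le_rfl
  rwa [List.take_length] at this

-- dp[i] = 1 + (max over eligible j < i), for the full dp
lemma dp_entry (nums : List Int) (i : Nat) (hi : i < nums.length) :
    (altDp nums).getD i 0 = 1 + MxF nums (altDp nums) (nums.getD i 0) i := by
  have hstab : ∀ j, j < i → (altDp nums).getD j 0 = (dpF nums i).getD j 0 := by
    intro j hj
    rw [altDp_eq_dpF]
    exact dpF_getD_lt nums i nums.length j hj hi.le
  rw [show (altDp nums).getD i 0 = (dpF nums (i+1)).getD i 0 by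
        rw [altDp_eq_dpF]; exact dpF_getD_lt nums (i+1) nums.length i (Nat.lt_succ_self i) hi]
  rw [show dpF nums (i+1) = dpF nums i ++ [altEntry nums (dpF nums i) (nums.getD i 0)] from rfl]
  rw [List.getD_append_right (dpF nums i) _ _ _ (by rw [dpF_length]), dpF_length, Nat.sub_self]
  rw [show ([altEntry nums (dpF nums i) (nums.getD i 0)].getD 0 0) =
        altEntry nums (dpF nums i) (nums.getD i 0) from rfl]
  have hpos : ∀ k, k < (dpF nums i).length → 1 ≤ (dpF nums i).getD k 0 := by
    intro k hk
    rw [dpF_length] at hk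
    exact (dpF_pos_le nums i k hk).1
  rw [altEntry_eq_mx nums _ _ hpos, dpF_length]
  congr 1
  exact mx_congr nums (dpF nums i) (altDp nums) (nums.getD i 0) i
    (fun j hj => (hstab j hj).symm)

lemma dp_pos (nums : List Int) (i : Nat) (hi : i < nums.length) :
    1 ≤ (altDp nums).getD i 0 := by
  rw [altDp_eq_dpF]
  exact (dpF_pos_le nums nums.length i hi).1

lemma dp_le (nums : List Int) (i : Nat) (hi : i < nums.length) :
    (altDp nums).getD i 0 ≤ (i : Int) + 1 := by
  rw [altDp_eq_dpF]
  exact (dpF_pos_le nums nums.length i hi).2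

-- A's inner loop invariant
lemma innerA (nums dp0 prev0 : List Int) (i : Nat) (hi : i < nums.length)
    (hd : dp0.length = nums.length) (hp : prev0.length = nums.length)
    (hpos : ∀ j, j < i → 1 ≤ dp0.getD j 0)
    (hdpi : dp0.getD i 0 = 1) (hpri : prev0.getD i 0 = -1) :
    ∀ m, m ≤ i →
      (List.range m).foldl (innerStepN nums i) (dp0, prev0) =
        (dp0.set i (1 + MxF nums dp0 (nums.getD i 0) m),
         prev0.set i (PfD (PfindF nums dp0 (nums.getD i 0) (MxF nums dp0 (nums.getD i 0) m) m))) := by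
  have hdi : i < dp0.length := hd ▸ hi
  have hpi : i < prev0.length := hp ▸ hi
  intro m hm
  induction m with
  | zero =>
    simp only [List.range_zero, List.foldl_nil, MxF, PfindF, PfD, List.find?_nil]
    have h1 : dp0.set i (1 + 0) = dp0 := by
      rw [show (1 : Int) + 0 = 1 by ring, ← hdpi, List.getD_eq_getElem _ _ hdi,
        List.set_getElem_self]
    have h2 : prev0.set i ((none : Option Nat).elim (-1 : Int) fun j => (j : Int)) = prev0 := by
      rw [show ((none : Option Nat).elim (-1 : Int) fun j => (j : Int)) = (-1 : Int) from rfl,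
        ← hpri, List.getD_eq_getElem _ _ hpi, List.set_getElem_self]
    rw [h1, h2]
  | succ m ih =>
    have hmi : m < i := Nat.lt_of_succ_le hm
    rw [List.range_succ, List.foldl_append, ih (Nat.le_of_succ_le hm), List.foldl_cons,
        List.foldl_nil]
    have hSgi : (dp0.set i (1 + MxF nums dp0 (nums.getD i 0) m)).getD i 0
        = 1 + MxF nums dp0 (nums.getD i 0) m := by
      rw [List.getD_eq_getElem _ _ (by simpa using hdi)]; simp
    have hSgm : (dp0.set i (1 + MxF nums dp0 (nums.getD i 0) m)).getD m 0 = dp0.getD m 0 := by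
      simp [List.getD, List.getElem?_set_ne (Nat.ne_of_lt' hmi)]
    unfold innerStepN
    simp only [hSgi, hSgm]
    by_cases hc : nums.getD m 0 ≤ nums.getD i 0 ∧
        MxF nums dp0 (nums.getD i 0) m < dp0.getD m 0
    · rw [if_pos (by exact ⟨hc.1, by have := hc.2; omega⟩)]
      simp only [List.set_set, Prod.mk.injEq]
      have hmx : MxF nums dp0 (nums.getD i 0) (m+1) = dp0.getD m 0 := by
        rw [mx_succ, if_pos hc.1, max_eq_right (le_of_lt hc.2)]
      refine ⟨?_, ?_⟩
      · rw [hmx, show (1 : Int) + dp0.getD m 0 = dp0.getD m 0 + 1 by ring]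
      · rw [hmx]
        have hfind : PfindF nums dp0 (nums.getD i 0) (dp0.getD m 0) (m+1) = some m := by
          unfold PfindF
          rw [List.range_succ, List.find?_append]
          have h1 : (List.range m).find?
              (fun j => decide (dp0.getD j 0 = dp0.getD m 0 ∧ nums.getD j 0 ≤ nums.getD i 0)) =
              none := by
            rw [List.find?_eq_none]
            intro j hj
            simp only [decide_eq_true_eq, not_and]
            intro hdj hje
            have := mx_ub nums dp0 (nums.getD i 0) m j (List.mem_range.mp hj) hje
            have := hc.2
            omega
          rw [h1, Option.none_or]
          have hcm := hc.1
          simp only [List.getD_eq_getElem?_getD] at hcm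
          simp [hcm]
        rw [hfind]
        rfl
    · rw [if_neg (by rw [not_and] at hc ⊢; intro h1; have := hc h1; omega)]
      have hmx : MxF nums dp0 (nums.getD i 0) (m+1) = MxF nums dp0 (nums.getD i 0) m := by
        rw [mx_succ]
        split_ifs with he
        · rw [max_eq_left]
          rw [not_and] at hc
          exact le_of_not_gt (hc he)
        · rfl
      rw [hmx]
      refine Prod.ext rfl ?_
      show _ = prev0.set i (PfD (PfindF nums dp0 (nums.getD i 0)
        (MxF nums dp0 (nums.getD i 0) m) (m+1)))
      unfold PfindF
      rw [List.range_succ, List.find?_append]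
      cases hfm : (List.range m).find?
          (fun j => decide (dp0.getD j 0 = MxF nums dp0 (nums.getD i 0) m ∧
            nums.getD j 0 ≤ nums.getD i 0)) with
      | some j => rfl
      | none =>
        have hpm : ¬ (dp0.getD m 0 = MxF nums dp0 (nums.getD i 0) m ∧
            nums.getD m 0 ≤ nums.getD i 0) := by
          rintro ⟨h1, h2⟩
          rcases mx_att nums dp0 (nums.getD i 0) m with h0 | ⟨j, hj, hje, hjv⟩
          · have := hpos m hmi; omega
          · rw [List.find?_eq_none] at hfm
            exact hfm j (List.mem_range.mpr hj) (by simp only [List.getD_eq_getElem?_getD] at hjv hje ⊢; simp [hjv, hje])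
        simp only [List.getD_eq_getElem?_getD] at hpm
        simp [hpm]

-- A's outer loop invariant
lemma outerA (nums : List Int) :
    ∀ m, m ≤ nums.length →
      (List.range m).foldl
          (fun st i => (List.range i).foldl (innerStepN nums i) st)
          (List.replicate nums.length (1 : Int), List.replicate nums.length (-1 : Int)) =
        (dpF nums m ++ List.replicate (nums.length - m) (1 : Int),
         prevL nums (altDp nums) m ++ List.replicate (nums.length - m) (-1 : Int)) := by
  intro m hm
  induction m with
  | zero => simp [dpF, prevL]
  | succ m ih =>
    have hmn : m < nums.length := Nat.lt_of_succ_le hm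
    rw [List.range_succ, List.foldl_append, ih (Nat.le_of_succ_le hm), List.foldl_cons,
        List.foldl_nil]
    have hk : 1 ≤ nums.length - m := by omega
    have hlenA : (dpF nums m).length = m := dpF_length nums m
    have hlenP : (prevL nums (altDp nums) m).length = m := by
      simp [prevL]
    have hd : (dpF nums m ++ List.replicate (nums.length - m) (1 : Int)).length
        = nums.length := by simp [hlenA]; omega
    have hp : (prevL nums (altDp nums) m ++ List.replicate (nums.length - m) (-1 : Int)).length
        = nums.length := by simp [hlenP]; omega
    have hpos : ∀ j, j < m →
        1 ≤ (dpF nums m ++ List.replicate (nums.length - m) (1 : Int)).getD j 0 := by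
      intro j hj
      rw [List.getD_append _ _ _ _ (by omega)]
      exact (dpF_pos_le nums m j hj).1
    have hdpi : (dpF nums m ++ List.replicate (nums.length - m) (1 : Int)).getD m 0 = 1 := by
      rw [List.getD_append_right (dpF nums m) _ _ m (by rw [hlenA])]
      rw [hlenA, Nat.sub_self]
      rcases Nat.exists_eq_add_of_le hk with ⟨k, hkk⟩
      rw [hkk, Nat.add_comm, List.replicate_succ]
      rfl
    have hpri : (prevL nums (altDp nums) m ++
        List.replicate (nums.length - m) (-1 : Int)).getD m 0 = -1 := by
      rw [List.getD_append_right (prevL nums (altDp nums) m) _ _ m (by rw [hlenP])]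
      rw [hlenP, Nat.sub_self]
      rcases Nat.exists_eq_add_of_le hk with ⟨k, hkk⟩
      rw [hkk, Nat.add_comm, List.replicate_succ]
      rfl
    rw [innerA nums _ _ m hmn hd hp hpos hdpi hpri m le_rfl]
    -- entries below m agree with dpF m and with altDp
    have hagree : ∀ j, j < m →
        (dpF nums m ++ List.replicate (nums.length - m) (1 : Int)).getD j 0
          = (dpF nums m).getD j 0 := by
      intro j hj
      exact List.getD_append _ _ _ _ (by omega)
    have hagree2 : ∀ j, j < m → (dpF nums m).getD j 0 = (altDp nums).getD j 0 := by
      intro j hj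
      rw [altDp_eq_dpF]
      exact (dpF_getD_lt nums m nums.length j hj hmn.le).symm
    have hxm : (1 : Int) + MxF nums
        (dpF nums m ++ List.replicate (nums.length - m) (1 : Int)) (nums.getD m 0) m
        = altEntry nums (dpF nums m) (nums.getD m 0) := by
      rw [mx_congr nums _ (dpF nums m) (nums.getD m 0) m hagree]
      rw [altEntry_eq_mx nums (dpF nums m) (nums.getD m 0)
        (fun k hkl => (dpF_pos_le nums m k (by rwa [hlenA] at hkl)).1), hlenA]
    have hwm : PfD (PfindF nums
          (dpF nums m ++ List.replicate (nums.length - m) (1 : Int)) (nums.getD m 0)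
          (MxF nums (dpF nums m ++ List.replicate (nums.length - m) (1 : Int))
            (nums.getD m 0) m) m)
        = pfv nums (altDp nums) m := by
      unfold pfv
      congr 1
      rw [pfind_congr nums _ (altDp nums) _ _ m
        (fun j hj => (hagree j hj).trans (hagree2 j hj))]
      congr 1
      · rw [mx_congr nums _ (altDp nums) (nums.getD m 0) m
          (fun j hj => (hagree j hj).trans (hagree2 j hj))]
        rw [dp_entry nums m hmn]
        ring
    rw [hxm, hwm]
    -- surgery on both set-appends
    rcases Nat.exists_eq_add_of_le hk with ⟨k, hkk⟩
    have hs1 : (dpF nums m ++ List.replicate (nums.length - m) (1 : Int)).set m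
          (altEntry nums (dpF nums m) (nums.getD m 0))
        = dpF nums (m+1) ++ List.replicate (nums.length - (m+1)) (1 : Int) := by
      rw [hkk, Nat.add_comm, List.replicate_succ, List.set_append]
      rw [if_neg (by rw [hlenA]; omega), hlenA, Nat.sub_self]
      show dpF nums m ++ altEntry nums (dpF nums m) (nums.getD m 0) :: List.replicate k 1 = _
      rw [show dpF nums (m+1) = dpF nums m ++ [altEntry nums (dpF nums m) (nums.getD m 0)]
        from rfl]
      simp
      omega
    have hs2 : (prevL nums (altDp nums) m ++
          List.replicate (nums.length - m) (-1 : Int)).set m (pfv nums (altDp nums) m)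
        = prevL nums (altDp nums) (m+1) ++ List.replicate (nums.length - (m+1)) (-1 : Int) := by
      rw [hkk, Nat.add_comm, List.replicate_succ, List.set_append]
      rw [if_neg (by rw [hlenP]; omega), hlenP, Nat.sub_self]
      show prevL nums (altDp nums) m ++ pfv nums (altDp nums) m :: List.replicate k (-1) = _
      rw [show prevL nums (altDp nums) (m+1)
          = prevL nums (altDp nums) m ++ [pfv nums (altDp nums) m] by
        unfold prevL; rw [List.range_succ, List.map_append]; rfl]
      simp
      omega
    rw [hs1, hs2]

-- the nested fold in port A, normalized to Nat indices, equals the invariant's shape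
lemma foldA_norm (nums : List Int) :
    ((PySem.List.pyRange 0 (nums.length : Int) 1).foldl (fun st i =>
        (PySem.List.pyRange 0 i 1).foldl (fun st j =>
          let dp := st.1
          let prev := st.2
          if PySem.List.pyGetD nums j 0 ≤ PySem.List.pyGetD nums i 0 ∧
             PySem.List.pyGetD dp j 0 + 1 > PySem.List.pyGetD dp i 0 then
            (PySem.List.pySetD dp i (PySem.List.pyGetD dp j 0 + 1),
             PySem.List.pySetD prev i j)
          else st) st)
        (List.replicate nums.length (1 : Int), List.replicate nums.length (-1 : Int))) =
      (altDp nums, prevL nums (altDp nums) nums.length) := by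
  rw [PySem.List.pyRange_zero_nat, List.foldl_map]
  have hbody : ∀ (st : List Int × List Int) (i : Nat),
      (PySem.List.pyRange 0 (i : Int) 1).foldl (fun st j =>
          let dp := st.1
          let prev := st.2
          if PySem.List.pyGetD nums j 0 ≤ PySem.List.pyGetD nums (i : Int) 0 ∧
             PySem.List.pyGetD dp j 0 + 1 > PySem.List.pyGetD dp (i : Int) 0 then
            (PySem.List.pySetD dp (i : Int) (PySem.List.pyGetD dp j 0 + 1),
             PySem.List.pySetD prev (i : Int) j)
          else st) st
        = (List.range i).foldl (innerStepN nums i) st := by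
    intro st i
    rw [PySem.List.pyRange_zero_nat, List.foldl_map]
    apply PySem.List.foldl_congr_mem
    intro acc j _
    simp only [PySem.List.pyGetD_natCast, PySem.List.pySetD_natCast, gt_iff_lt]
    rfl
  simp only [hbody]
  rw [outerA nums nums.length le_rfl]
  simp [altDp_eq_dpF]

-- if dp[i] ≥ 2 the predecessor search succeeds
lemma pfind_some (nums : List Int) (i : Nat) (hi : i < nums.length)
    (h2 : 2 ≤ (altDp nums).getD i 0) :
    ∃ j, PfindF nums (altDp nums) (nums.getD i 0) ((altDp nums).getD i 0 - 1) i = some j ∧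
      j < i ∧ (altDp nums).getD j 0 = (altDp nums).getD i 0 - 1 := by
  have hmx : (altDp nums).getD i 0 - 1 = MxF nums (altDp nums) (nums.getD i 0) i := by
    rw [dp_entry nums i hi]; ring
  have hatt := mx_att nums (altDp nums) (nums.getD i 0) i
  rcases hatt with h0 | ⟨j, hj, hje, hjv⟩
  · omega
  · have hsome : (PfindF nums (altDp nums) (nums.getD i 0)
        ((altDp nums).getD i 0 - 1) i).isSome = true := by
      unfold PfindF
      rw [List.find?_isSome]
      exact ⟨j, List.mem_range.mpr hj, by
        simp only [decide_eq_true_eq]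
        exact ⟨by omega, hje⟩⟩
    cases hf : PfindF nums (altDp nums) (nums.getD i 0) ((altDp nums).getD i 0 - 1) i with
    | none => rw [hf] at hsome; simp at hsome
    | some j0 =>
      refine ⟨j0, rfl, ?_, ?_⟩
      · have := List.mem_range.mp (List.mem_of_find?_eq_some hf)
        exact this
      · have := List.find?_some hf
        simp only [decide_eq_true_eq] at this
        exact this.1

lemma pfind_none (nums : List Int) (i : Nat) (hi : i < nums.length)
    (h1 : (altDp nums).getD i 0 = 1) :
    PfindF nums (altDp nums) (nums.getD i 0) ((altDp nums).getD i 0 - 1) i = none := by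
  unfold PfindF
  rw [List.find?_eq_none]
  intro j hj
  simp only [decide_eq_true_eq, not_and]
  intro hdj
  have := dp_pos nums j (lt_trans (List.mem_range.mp hj) hi)
  omega

lemma prevL_getD (nums dp : List Int) (n i : Nat) (hi : i < n) :
    (prevL nums dp n).getD i 0 = pfv nums dp i := by
  unfold prevL
  rw [List.getD_eq_getElem _ _ (by simpa using hi)]
  simp

-- A's while loop produces the path
lemma whileA_path (nums : List Int) :
    ∀ (k : Nat) (i : Nat) (acc : List Int) (fuel : Nat),
      i < nums.length → (altDp nums).getD i 0 = (k : Int) → 1 ≤ k → k ≤ fuel →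
      whileA nums (prevL nums (altDp nums) nums.length) fuel (i : Int) acc =
        acc ++ pathF nums (altDp nums) k i := by
  have hneg : ∀ (f : Nat) (acc : List Int),
      whileA nums (prevL nums (altDp nums) nums.length) f (-1) acc = acc := by
    intro f acc
    cases f with
    | zero => rfl
    | succ f => simp [whileA]
  intro k
  induction k with
  | zero => intro i acc fuel _ _ h1 _; omega
  | succ k ih =>
    intro i acc fuel hi hdp _ hfuel
    cases fuel with
    | zero => omega
    | succ f =>
      rw [show whileA nums (prevL nums (altDp nums) nums.length) (f+1) (i : Int) acc
          = if (i : Int) ≠ -1 then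
              whileA nums (prevL nums (altDp nums) nums.length) f
                (PySem.List.pyGetD (prevL nums (altDp nums) nums.length) (i : Int) 0)
                (acc ++ [PySem.List.pyGetD nums (i : Int) 0])
            else acc from rfl]
      rw [if_pos (by omega)]
      simp only [PySem.List.pyGetD_natCast]
      rw [prevL_getD nums (altDp nums) nums.length i hi]
      rcases Nat.eq_zero_or_pos k with rfl | hk1
      · have h1 : (altDp nums).getD i 0 = 1 := by exact_mod_cast hdp
        unfold pfv
        rw [pfind_none nums i hi h1]
        rw [show PfD none = (-1 : Int) from rfl, hneg]
        simp [pathF]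
      · obtain ⟨j0, hfind, hj0i, hj0v⟩ := pfind_some nums i hi (by rw [hdp]; push_cast; omega)
        unfold pfv
        rw [hfind, show PfD (some j0) = (j0 : Int) from rfl]
        rw [ih j0 (acc ++ [nums.getD i 0]) f (lt_trans hj0i hi)
          (by rw [hj0v, hdp]; push_cast; ring) hk1 (by omega)]
        rw [show pathF nums (altDp nums) (k+1) i
            = nums.getD i 0 :: pathF nums (altDp nums) k (nextF nums (altDp nums) i) from rfl]
        rw [show nextF nums (altDp nums) i = j0 by unfold nextF; rw [hfind]; rfl]
        simp

-- B's reconstruction fold produces the same path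
lemma altFold_path (nums : List Int) :
    ∀ (t : Nat) (cur : Nat) (acc : List Int),
      cur < nums.length → (altDp nums).getD cur 0 = (t : Int) + 1 →
      ((PySem.List.pyRange (t : Int) 0 (-1)).foldl (altStep nums (altDp nums))
          ((cur : Int), acc)).2 =
        acc ++ pathF nums (altDp nums) t (nextF nums (altDp nums) cur) := by
  intro t
  induction t with
  | zero =>
    intro cur acc _ _
    rw [show ((0 : Nat) : Int) = 0 from rfl, PySem.List.pyRange_neg_one_eq_nil le_rfl]
    simp [pathF]
  | succ t ih =>
    intro cur acc hcur hdp
    rw [PySem.List.pyRange_neg_one_cons (by push_cast; omega)]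
    rw [List.foldl_cons]
    obtain ⟨j0, hfind, hj0c, hj0v⟩ := pfind_some nums cur hcur (by rw [hdp]; push_cast; omega)
    have htgt : ((altDp nums).getD cur 0 - 1) = (((t+1 : Nat)) : Int) := by
      rw [hdp]; ring
    have hstep : altStep nums (altDp nums) ((cur : Int), acc) (((t+1 : Nat) : Int))
        = ((j0 : Int), acc ++ [nums.getD j0 0]) := by
      simp only [altStep]
      rw [PySem.List.pyRange_zero_nat, List.find?_map]
      have hfind2 : (List.range cur).find?
          ((fun j => decide (PySem.List.pyGetD (altDp nums) j 0 = (((t+1 : Nat)) : Int) ∧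
            PySem.List.pyGetD nums j 0 ≤ PySem.List.pyGetD nums (cur : Int) 0)) ∘
            (fun k : Nat => (k : Int))) = some j0 := by
        rw [find?_congr' _ _
          (fun j => decide ((altDp nums).getD j 0 = (altDp nums).getD cur 0 - 1 ∧
            nums.getD j 0 ≤ nums.getD cur 0))
          (by intro a _
              have htgt' := htgt
              simp only [List.getD_eq_getElem?_getD] at htgt'
              push_cast at htgt' ⊢
              simp [Function.comp, PySem.List.pyGetD_natCast, htgt'])]
        unfold PfindF at hfind
        exact hfind
      rw [hfind2]
      simp [PySem.List.pyGetD_natCast]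
    rw [hstep]
    rw [show ((t+1 : Nat) : Int) - 1 = ((t : Nat) : Int) by push_cast; ring]
    rw [ih j0 (acc ++ [nums.getD j0 0]) (lt_trans hj0c hcur)
      (by rw [hj0v, hdp]; push_cast; ring)]
    rw [show nextF nums (altDp nums) cur = j0 by unfold nextF; rw [hfind]; rfl]
    rw [show pathF nums (altDp nums) (t+1) j0
        = nums.getD j0 0 :: pathF nums (altDp nums) t (nextF nums (altDp nums) j0) from rfl]
    simp

-- ===== VERDICT (by name: the statement is the Claim_ definition above) =====
theorem longest_non_decreasing_subsequence_spec : Claim_equal_longest_non_decreasing_subsequence := by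
  intro nums _
  unfold Spec_longest_non_decreasing_subsequence
  unfold longest_non_decreasing_subsequence longest_non_decreasing_subsequence_alt
  by_cases hnil : nums = []
  · rw [if_pos hnil, if_pos hnil]
  · rw [if_neg hnil, if_neg hnil]
    simp only [foldA_norm]
    have hdplen : (altDp nums).length = nums.length := by
      rw [altDp_eq_dpF]; exact dpF_length nums nums.length
    have hnlen : 0 < nums.length := List.length_pos_iff.mpr hnil
    cases hmax : PySem.List.max? (altDp nums) (fun y => y) with
    | none =>
      rw [PySem.List.max?_eq_none_iff] at hmax
      exact absurd (by rw [hmax]; rfl) (by rw [← hdplen] at hnlen; omega : (altDp nums).length ≠ 0)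
    | some b =>
    have hbmem := PySem.List.max?_mem hmax
    cases hidxeq : PySem.List.index? (altDp nums) b with
    | none =>
      rw [PySem.List.index?_eq_none_iff] at hidxeq
      exact absurd hbmem hidxeq
    | some k =>
    obtain ⟨hk, hkb, -⟩ := PySem.List.getElem_of_index?_eq_some hidxeq
    have hkn : k < nums.length := hdplen ▸ hk
    have hgetD : (altDp nums).getD k 0 = b := by rw [List.getD_eq_getElem _ _ hk, hkb]
    have hb1 : (1 : Int) ≤ b := hgetD ▸ dp_pos nums k hkn
    have hble : b ≤ (k : Int) + 1 := hgetD ▸ dp_le nums k hkn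
    have hbK : b = ((b.toNat : Nat) : Int) := (Int.toNat_of_nonneg (by omega)).symm
    have hK1 : 1 ≤ b.toNat := by omega
    have hKfuel : b.toNat ≤ nums.length + 1 := by omega
    simp only [Option.getD_some, hidxeq]
    rw [whileA_path nums b.toNat k [] (nums.length + 1) hkn (by rw [hgetD]; omega) hK1 hKfuel]
    rw [show b - 1 = ((b.toNat - 1 : Nat) : Int) by omega]
    simp only [PySem.List.pyGetD_natCast]
    rw [altFold_path nums (b.toNat - 1) k [nums.getD k 0] hkn
      (by rw [hgetD]; omega)]
    rw [show pathF nums (altDp nums) b.toNat k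
        = nums.getD k 0 :: pathF nums (altDp nums) (b.toNat - 1) (nextF nums (altDp nums) k) by
      rw [show b.toNat = (b.toNat - 1) + 1 by omega]; rfl]
    simp
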